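-- pv_equiv track=rewrite | github.com/Gowrisankar5877/Devops_Learning | python/007_FindingNthLargest_NthSmallest.py | find_nth_largest_smallest
-- ===== SOURCE A (Python) =====
-- def find_nth_largest_smallest(arr, n):
--     for i in range(n):
--         smallest = float('inf')
--         for num in arr:
--             if num < smallest and (i == 0 or num > prev_smallest):
--                 smallest = num
--         prev_smallest = smallest
--
--     for i in range(n):
--         largest = float('-inf')
--         for num in arr:
--             if num > largest and (i == 0 or num < prev_largest):
--                 largest = num
--         prev_largest = largest
--
--     return prev_smallest, prev_largest
-- ===== SOURCE B (Python) =====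
-- def find_nth_largest_smallest(arr, n):
--     d = sorted(set(arr))
--     return d[n - 1], d[len(d) - n]
-- ===== Notes on version B (the rewrite author's own statement) =====
-- stated objective: faster
-- what changed: Instead of n linear scans each re-finding the next distinct smallest/largest, B sorts the distinct values once and indexes the n-th element from each end.
-- outside the precondition, e.g. on find_nth_largest_smallest([], 1): A returns (inf, -inf), B raises IndexError; on find_nth_largest_smallest([1, 2], 3): A returns (inf, -inf), B raises IndexError; on find_nth_largest_smallest([5], 0): A raises UnboundLocalError, B raises IndexError
import Mathlib
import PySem

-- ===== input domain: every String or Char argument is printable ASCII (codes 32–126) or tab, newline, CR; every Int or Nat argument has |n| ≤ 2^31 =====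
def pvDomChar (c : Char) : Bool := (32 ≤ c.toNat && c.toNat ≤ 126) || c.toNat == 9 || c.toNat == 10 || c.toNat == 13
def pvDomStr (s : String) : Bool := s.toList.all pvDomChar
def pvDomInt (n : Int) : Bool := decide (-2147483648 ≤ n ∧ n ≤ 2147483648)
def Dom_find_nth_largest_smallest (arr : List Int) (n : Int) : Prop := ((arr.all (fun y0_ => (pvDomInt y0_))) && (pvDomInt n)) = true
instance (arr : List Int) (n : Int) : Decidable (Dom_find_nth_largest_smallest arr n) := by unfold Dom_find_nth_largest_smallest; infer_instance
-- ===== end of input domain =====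

-- B replaces A's n-fold rescans with one sort of the distinct values, indexed from both ends (return-value equivalence on Pre_).

-- ===== PORT A =====
-- inner 'for num in arr' of the smallest-loop; prev = none models the uninitialized
-- prev_smallest (only read when i ≠ 0 in Python, never inside Pre_); the running
-- 'smallest' starts at none, modelling float('inf') (num < inf is always true).
def pvStepMin (arr : List Int) (i : Int) (prev : Option Int) : Option Int :=
  arr.foldl (fun sm num =>
    if (sm.elim true (fun s => decide (num < s))) && (i == 0 || prev.elim false (fun p => decide (num > p)))
    then some num else sm) none

-- inner 'for num in arr' of the largest-loop; running 'largest' starts at none = float('-inf')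
def pvStepMax (arr : List Int) (i : Int) (prev : Option Int) : Option Int :=
  arr.foldl (fun lg num =>
    if (lg.elim true (fun s => decide (num > s))) && (i == 0 || prev.elim false (fun p => decide (num < p)))
    then some num else lg) none

def find_nth_largest_smallest (arr : List Int) (n : Int) : Int × Int :=
  let ps := (PySem.List.pyRange 0 n 1).foldl (fun prev i => pvStepMin arr i prev) none
  let pl := (PySem.List.pyRange 0 n 1).foldl (fun prev i => pvStepMax arr i prev) none
  (ps.getD 0, pl.getD 0)  -- .getD 0 totalizes: under Pre_ both are 'some' (Python returns ints there)

-- ===== PORT B =====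
def find_nth_largest_smallest_alt (arr : List Int) (n : Int) : Int × Int :=
  let d := PySem.List.sorted (PySem.Set.ofList arr) (fun x => x) false
  ((PySem.List.pyGet? d (n - 1)).getD 0, (PySem.List.pyGet? d ((d.length : Int) - n)).getD 0)  -- .getD 0 totalizes indexing; in range under Pre_

-- ===== PRECONDITION & SPEC =====
-- Pre_ excludes n ≤ 0 (A hits UnboundLocalError) and n > number of distinct values
-- (A returns the floats (inf, -inf), not a pair of ints); B raises IndexError on both.
def Pre_find_nth_largest_smallest (arr : List Int) (n : Int) : Prop :=
  1 ≤ n ∧ n ≤ ((PySem.List.dedup arr).length : Int)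
instance (arr : List Int) (n : Int) : Decidable (Pre_find_nth_largest_smallest arr n) := by unfold Pre_find_nth_largest_smallest; infer_instance
def pvWitness_find_nth_largest_smallest : List Int × Int := ([3, 1, 2, 1], 2)

def Spec_find_nth_largest_smallest (arr : List Int) (n : Int) (out : Int × Int) : Prop := out = find_nth_largest_smallest_alt arr n
instance (arr : List Int) (n : Int) (out : Int × Int) : Decidable (Spec_find_nth_largest_smallest arr n out) := by unfold Spec_find_nth_largest_smallest; infer_instance

-- ===== CLAIM (what is proved, stated in full; the proofs are below) =====
def Claim_equal_find_nth_largest_smallest : Prop := ∀ (arr : List Int) (n : Int), Dom_find_nth_largest_smallest arr n → Pre_find_nth_largest_smallest arr n → Spec_find_nth_largest_smallest arr n (find_nth_largest_smallest arr n)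

-- ===== LEMMAS AND PROOFS =====

-- the inner fold of the smallest-loop returns the minimum of the elements satisfying P
theorem pvFoldMin (l : List Int) (P : Int → Bool) (v : Int) (acc : Option Int)
    (hbound : ∀ x ∈ l, P x = true → v ≤ x)
    (hst : acc = some v ∨ (v ∈ l ∧ P v = true ∧ ∀ a, acc = some a → v < a)) :
    l.foldl (fun sm num => if (sm.elim true (fun s => decide (num < s))) && P num then some num else sm) acc = some v := by
  induction l generalizing acc with
  | nil =>
    rcases hst with h | ⟨h, _⟩
    · simpa using h
    · simp at h
  | cons x t ih =>
    simp only [List.foldl_cons]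
    apply ih
    · intro y hy hPy; exact hbound y (List.mem_cons_of_mem _ hy) hPy
    · rcases hst with h | ⟨hv, hPv, hacc⟩
      · subst h
        left
        have : ¬ (x < v ∧ P x = true) := by
          rintro ⟨hlt, hPx⟩
          exact absurd (hbound x (List.mem_cons_self) hPx) (by omega)
        simp only [Option.elim_some]
        split_ifs with hc
        · simp only [Bool.and_eq_true, decide_eq_true_eq] at hc
          exact absurd ⟨hc.1, hc.2⟩ this
        · rfl
      · by_cases hxv : x = v
        · subst hxv
          left
          have hlt : (acc.elim true (fun s => decide (x < s))) = true := by
            cases acc with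
            | none => rfl
            | some a => simpa using hacc a rfl
          simp [hlt, hPv]
        · rcases List.mem_cons.mp hv with h | hvt
          · exact absurd h.symm hxv
          · right
            refine ⟨hvt, hPv, ?_⟩
            intro a ha
            split_ifs at ha with hc
            · simp only [Option.some.injEq] at ha
              subst ha
              simp only [Bool.and_eq_true] at hc
              have := hbound x (List.mem_cons_self) hc.2
              omega
            · exact hacc a ha

-- the inner fold of the largest-loop returns the maximum of the elements satisfying P
theorem pvFoldMax (l : List Int) (P : Int → Bool) (v : Int) (acc : Option Int)
    (hbound : ∀ x ∈ l, P x = true → x ≤ v)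
    (hst : acc = some v ∨ (v ∈ l ∧ P v = true ∧ ∀ a, acc = some a → a < v)) :
    l.foldl (fun lg num => if (lg.elim true (fun s => decide (num > s))) && P num then some num else lg) acc = some v := by
  induction l generalizing acc with
  | nil =>
    rcases hst with h | ⟨h, _⟩
    · simpa using h
    · simp at h
  | cons x t ih =>
    simp only [List.foldl_cons]
    apply ih
    · intro y hy hPy; exact hbound y (List.mem_cons_of_mem _ hy) hPy
    · rcases hst with h | ⟨hv, hPv, hacc⟩
      · subst h
        left
        have : ¬ (x > v ∧ P x = true) := by
          rintro ⟨hlt, hPx⟩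
          exact absurd (hbound x (List.mem_cons_self) hPx) (by omega)
        simp only [Option.elim_some]
        split_ifs with hc
        · simp only [Bool.and_eq_true, decide_eq_true_eq] at hc
          exact absurd ⟨hc.1, hc.2⟩ this
        · rfl
      · by_cases hxv : x = v
        · subst hxv
          left
          have hlt : (acc.elim true (fun s => decide (x > s))) = true := by
            cases acc with
            | none => rfl
            | some a => simpa using hacc a rfl
          simp [hlt, hPv]
        · rcases List.mem_cons.mp hv with h | hvt
          · exact absurd h.symm hxv
          · right
            refine ⟨hvt, hPv, ?_⟩
            intro a ha
            split_ifs at ha with hc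
            · simp only [Option.some.injEq] at ha
              subst ha
              simp only [Bool.and_eq_true] at hc
              have := hbound x (List.mem_cons_self) hc.2
              omega
            · exact hacc a ha

-- monotonicity of a strictly increasing list
theorem pvMono (d : List Int) (hpw : d.Pairwise (· < ·)) {p q : Nat} (hp : p < d.length) (hq : q < d.length)
    (hpq : p ≤ q) : d[p] ≤ d[q] := by
  rcases Nat.lt_or_ge p q with h | h
  · exact le_of_lt ((List.pairwise_iff_getElem.mp hpw) p q hp hq h)
  · have : p = q := by omega
    subst this; rfl

-- after k+1 iterations of A's smallest-loop, prev_smallest = d[k]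
theorem pvChainMin (arr d : List Int) (hmem : ∀ x, x ∈ d ↔ x ∈ arr)
    (hpw : d.Pairwise (· < ·)) (k : Nat) (hk : k < d.length) :
    (PySem.List.pyRange 0 (((k : Int) + 1)) 1).foldl (fun prev i => pvStepMin arr i prev) none
      = some d[k] := by
  induction k with
  | zero =>
    rw [show (((0:Nat) : Int) + 1) = 0 + 1 by norm_num, PySem.List.pyRange_one_singleton]
    simp only [List.foldl_cons, List.foldl_nil]
    unfold pvStepMin
    apply pvFoldMin
    · intro x hx _
      have hxd := (hmem x).mpr hx
      obtain ⟨j, hj, rfl⟩ := List.getElem_of_mem hxd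
      exact pvMono d hpw hk hj (Nat.zero_le j)
    · right
      refine ⟨(hmem _).mp (List.getElem_mem hk), by simp, by simp⟩
  | succ k ih =>
    have hk' : k < d.length := Nat.lt_of_succ_lt hk
    have hsplit : PySem.List.pyRange 0 ((k : Int) + 1 + 1) 1
        = PySem.List.pyRange 0 ((k : Int) + 1) 1 ++ [(k : Int) + 1] := by
      exact PySem.List.pyRange_one_succ_right (by omega)
    push_cast
    rw [hsplit, List.foldl_append, ih hk']
    simp only [List.foldl_cons, List.foldl_nil]
    unfold pvStepMin
    apply pvFoldMin
    · intro x hx hPx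
      simp only [Bool.or_eq_true, beq_iff_eq, Option.elim_some, decide_eq_true_eq] at hPx
      rcases hPx with h | h
      · omega
      · have hxd := (hmem x).mpr hx
        obtain ⟨j, hj, rfl⟩ := List.getElem_of_mem hxd
        have : ¬ j ≤ k := by
          intro hle
          have := pvMono d hpw hj hk' hle
          omega
        exact pvMono d hpw hk hj (by omega)
    · right
      refine ⟨(hmem _).mp (List.getElem_mem hk), ?_, ?_⟩
      · have : d[k] < d[k + 1] := (List.pairwise_iff_getElem.mp hpw) k (k+1) hk' hk (by omega)
        simp only [Bool.or_eq_true, beq_iff_eq, Option.elim_some, decide_eq_true_eq]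
        right; omega
      · intro a ha
        exact absurd ha (by simp)

-- after k+1 iterations of A's largest-loop, prev_largest = d[d.length - 1 - k]
theorem pvChainMax (arr d : List Int) (hmem : ∀ x, x ∈ d ↔ x ∈ arr)
    (hpw : d.Pairwise (· < ·)) (k : Nat) (hk : k < d.length) :
    (PySem.List.pyRange 0 (((k : Int) + 1)) 1).foldl (fun prev i => pvStepMax arr i prev) none
      = some (d[d.length - 1 - k]'(by omega)) := by
  induction k with
  | zero =>
    rw [show (((0:Nat) : Int) + 1) = 0 + 1 by norm_num, PySem.List.pyRange_one_singleton]
    simp only [List.foldl_cons, List.foldl_nil]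
    unfold pvStepMax
    apply pvFoldMax
    · intro x hx _
      have hxd := (hmem x).mpr hx
      obtain ⟨j, hj, rfl⟩ := List.getElem_of_mem hxd
      exact pvMono d hpw hj (by omega) (by omega)
    · right
      refine ⟨(hmem _).mp (List.getElem_mem (by omega)), by simp, by simp⟩
  | succ k ih =>
    have hk' : k < d.length := Nat.lt_of_succ_lt hk
    have hsplit : PySem.List.pyRange 0 ((k : Int) + 1 + 1) 1
        = PySem.List.pyRange 0 ((k : Int) + 1) 1 ++ [(k : Int) + 1] := by
      exact PySem.List.pyRange_one_succ_right (by omega)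
    push_cast
    rw [hsplit, List.foldl_append, ih hk']
    simp only [List.foldl_cons, List.foldl_nil]
    unfold pvStepMax
    have hq : d.length - 1 - k < d.length := by omega
    have hq' : d.length - 1 - (k + 1) < d.length := by omega
    apply pvFoldMax
    · intro x hx hPx
      simp only [Bool.or_eq_true, beq_iff_eq, Option.elim_some, decide_eq_true_eq] at hPx
      rcases hPx with h | h
      · omega
      · have hxd := (hmem x).mpr hx
        obtain ⟨j, hj, rfl⟩ := List.getElem_of_mem hxd
        have : ¬ (d.length - 1 - k ≤ j) := by
          intro hle
          have := pvMono d hpw hq hj hle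
          omega
        exact pvMono d hpw hj hq' (by omega)
    · right
      refine ⟨(hmem _).mp (List.getElem_mem hq'), ?_, ?_⟩
      · have : d[d.length - 1 - (k+1)]'hq' < d[d.length - 1 - k]'hq :=
          (List.pairwise_iff_getElem.mp hpw) _ _ hq' hq (by omega)
        simp only [Bool.or_eq_true, beq_iff_eq, Option.elim_some, decide_eq_true_eq]
        right; omega
      · intro a ha
        exact absurd ha (by simp)

-- ===== VERDICT (by name: the statement is the Claim_ definition above) =====
theorem find_nth_largest_smallest_spec : Claim_equal_find_nth_largest_smallest := by
  intro arr n _ hpre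
  obtain ⟨h1, h2⟩ := hpre
  unfold Spec_find_nth_largest_smallest
  simp only [find_nth_largest_smallest, find_nth_largest_smallest_alt]
  set d := PySem.List.sorted (PySem.Set.ofList arr) (fun x => x) false with hd
  have hperm : d.Perm (PySem.Set.ofList arr) := PySem.List.sorted_perm _ _ _
  have hmem : ∀ x, x ∈ d ↔ x ∈ arr := by
    intro x
    exact (hperm.mem_iff).trans (PySem.Set.mem_ofList arr x)
  have hpw : d.Pairwise (· < ·) := PySem.List.sorted_ofList_pairwise_lt arr
  have hlen : d.length = (PySem.List.dedup arr).length := by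
    rw [hperm.length_eq]
    simp [PySem.List.dedup_eq_ofList]
  have hm : 1 ≤ d.length ∧ n.toNat ≤ d.length := by
    constructor <;> omega
  set k : Nat := n.toNat - 1 with hkdef
  have hn : n = (k : Int) + 1 := by omega
  have hk : k < d.length := by omega
  have hkm : d.length - 1 - k = d.length - n.toNat := by omega
  have hmin := pvChainMin arr d hmem hpw k hk
  have hmax := pvChainMax arr d hmem hpw k hk
  rw [hn]
  simp only [hmin, hmax, Option.getD_some]
  have hg1 : PySem.List.pyGet? d ((k : Int) + 1 - 1) = some d[k] := by
    rw [show ((k : Int) + 1 - 1) = (k : Int) by ring, PySem.List.pyGet?_natCast,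
      List.getElem?_eq_getElem hk]
  have hg2 : PySem.List.pyGet? d ((d.length : Int) - ((k : Int) + 1)) = some (d[d.length - 1 - k]'(by omega)) := by
    have h0 : (0 : Int) ≤ (d.length : Int) - ((k : Int) + 1) := by omega
    rw [PySem.List.pyGet?_of_nonneg _ h0]
    have : ((d.length : Int) - ((k : Int) + 1)).toNat = d.length - 1 - k := by omega
    rw [this, List.getElem?_eq_getElem (by omega)]
  rw [hg1, hg2]
  simp
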